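-- pv_equiv track=rewrite | github.com/BensonZhou1991/MCTS-New | cir_gen/converter.py | map_convert
-- ===== SOURCE A (Python) =====
-- def map_convert(map1, map2, num_q_phy):
--     '''
--     Generate physical SWAP sequence to convert map1 to map2 assuming the full
--     connectivity.
--     map:
--         list -> log_q to phy_q
--     '''
--     swaps = []
--     num_q_log = len(map1)
--     for q_log in range(num_q_log):
--         q_phy1, q_phy2 = map1[q_log], map2[q_log]
--         if q_phy1 == -1 or q_phy2 == -1:
--             if q_phy1 == -1 and q_phy2 == -1: continue
--             raise()
--         if q_phy1 != q_phy2: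
--             swaps.append((q_phy1, q_phy2))
--             for q in range(num_q_log):
--                 if map1[q] == q_phy2:
--                     map1[q] = q_phy1
--                     break
--             map1[q_log] = q_phy2
--     return swaps
-- ===== SOURCE B (Python) =====
-- def map_convert(map1, map2, num_q_phy):
--     """Instead of mutating the mapping array and rescanning it for every swap,
--     keep map1 immutable plus a sparse overlay 'delta' of changed cells, and an
--     inverted multimap 'pos' (value -> set of positions) from which the first
--     occurrence of the wanted value is taken as min(). Return value only: unlike
--     A, this does not mutate map1 in place."""
--     swaps = []
--     pos = {}
--     for k, v in enumerate(map1):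
--         if v != -1:
--             pos.setdefault(v, set()).add(k)
--     delta = {}
--     for i in range(len(map1)):
--         s = delta.get(i, map1[i])
--         t = map2[i]
--         if s == -1 or t == -1:
--             if s == -1 and t == -1:
--                 continue
--             raise ValueError("inconsistent unassigned qubit")
--         if s == t:
--             continue
--         swaps.append((s, t))
--         ts = pos.get(t)
--         if ts:
--             q = min(ts)
--             delta[q] = s
--             ts.discard(q)
--             pos.setdefault(s, set()).add(q)
--         delta[i] = t
--         ps = pos.get(s)
--         if ps:
--             ps.discard(i)
--         pos.setdefault(t, set()).add(i)
--     return swaps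
-- ===== Notes on version B (the rewrite author's own statement) =====
-- stated objective: faster
-- what changed: B never mutates or rescans the mapping array: it keeps map1 immutable plus a sparse overlay dict of changed cells and an inverted multimap (value -> set of positions) whose min() yields the first occurrence, replacing A's inner linear rescan per swap.
import Mathlib
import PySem

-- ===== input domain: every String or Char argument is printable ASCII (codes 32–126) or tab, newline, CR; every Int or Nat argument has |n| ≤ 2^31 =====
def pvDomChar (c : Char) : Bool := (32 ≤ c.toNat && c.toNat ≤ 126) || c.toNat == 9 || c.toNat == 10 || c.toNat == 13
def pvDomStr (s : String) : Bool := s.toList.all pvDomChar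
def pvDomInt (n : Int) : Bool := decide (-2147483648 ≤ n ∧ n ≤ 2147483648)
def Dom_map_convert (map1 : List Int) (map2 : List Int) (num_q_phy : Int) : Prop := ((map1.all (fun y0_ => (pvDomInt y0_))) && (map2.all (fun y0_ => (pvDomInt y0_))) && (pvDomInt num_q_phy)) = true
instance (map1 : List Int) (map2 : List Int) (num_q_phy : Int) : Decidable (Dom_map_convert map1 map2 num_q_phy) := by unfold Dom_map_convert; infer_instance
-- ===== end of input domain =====

-- B replaces A's in-place array simulation with inner rescans by an immutable map1
-- plus a sparse overlay of changed cells and an inverted multimap value -> set of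
-- positions (first occurrence = min of the set); equivalence is about the RETURN
-- value only (A mutates map1 in place, B does not).

-- ===== PORT A =====
-- inner 'for q in range(num_q_log): if map1[q] == q_phy2: map1[q] = q_phy1; break'
-- (map1 keeps length num_q_log throughout, so scanning the list is scanning range(num_q_log))
def innerA (m : List Int) (t s : Int) : List Int :=
  match m with
  | [] => []
  | x :: xs => if x = t then s :: xs else x :: innerA xs t s

def loopA (map2 : List Int) (n : Nat) (i : Nat) (m : List Int) (swaps : List (List Int)) :
    List (List Int) :=
  if _h : i < n then
    match PySem.List.pyGet? m (i : Int), PySem.List.pyGet? map2 (i : Int) with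
    | some s, some t =>
      if s = -1 ∨ t = -1 then
        if s = -1 ∧ t = -1 then loopA map2 n (i+1) m swaps
        else swaps  -- A executes 'raise()' here; excluded by Pre_
      else if s ≠ t then
        loopA map2 n (i+1) (PySem.List.pySetD (innerA m t s) (i : Int) t) (swaps ++ [[s, t]])
      else loopA map2 n (i+1) m swaps
    | _, _ => swaps  -- IndexError on map2; excluded by Pre_
  else swaps
termination_by n - i

def map_convert (map1 : List Int) (map2 : List Int) (num_q_phy : Int) : List (List Int) :=
  loopA map2 map1.length 0 map1 []

-- ===== PORT B =====
-- pos.setdefault(v, set()).add(x)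
def posAdd (pos : PySem.Dict Int (PySem.Set Int)) (v x : Int) :
    PySem.Dict Int (PySem.Set Int) :=
  pos.insert v (PySem.Set.add (pos.getD v PySem.Set.empty) x)

-- 'ps = pos.get(v); if ps: ps.discard(x)'
def posDiscard (pos : PySem.Dict Int (PySem.Set Int)) (v x : Int) :
    PySem.Dict Int (PySem.Set Int) :=
  match pos.get? v with
  | some ps => if ps = [] then pos else pos.insert v (PySem.Set.discard ps x)
  | none => pos

-- 'pos = {}; for k, v in enumerate(map1): if v != -1: pos.setdefault(v, set()).add(k)'
def buildPos (map1 : List Int) : PySem.Dict Int (PySem.Set Int) :=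
  (PySem.List.enumerate map1).foldl
    (fun d p => if p.2 ≠ -1 then posAdd d p.2 p.1 else d)
    PySem.Dict.empty

-- 'for i in range(len(map1)): …'
def loopB (map1 map2 : List Int) (n : Nat) (i : Nat) (delta : PySem.Dict Int Int)
    (pos : PySem.Dict Int (PySem.Set Int)) (swaps : List (List Int)) : List (List Int) :=
  if _h : i < n then
    match PySem.List.pyGet? map1 (i : Int), PySem.List.pyGet? map2 (i : Int) with
    | some v, some t =>
      let s := delta.getD (i : Int) v    -- s = delta.get(i, map1[i])
      if s = -1 ∨ t = -1 then
        if s = -1 ∧ t = -1 then loopB map1 map2 n (i+1) delta pos swaps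
        else swaps  -- Source B raises ValueError here; excluded by Pre_
      else if s = t then loopB map1 map2 n (i+1) delta pos swaps
      else
        let ts := pos.getD t PySem.Set.empty   -- 'ts = pos.get(t)' (None and the empty set are both falsey below)
        match PySem.List.min? ts (fun x => x) with   -- 'if ts: q = min(ts)'
        | some q =>
          loopB map1 map2 n (i+1) ((delta.insert q s).insert (i : Int) t)
            (posAdd (posDiscard (posAdd (pos.insert t (PySem.Set.discard ts q)) s q)
              s (i : Int)) t (i : Int))
            (swaps ++ [[s, t]])
        | none =>
          loopB map1 map2 n (i+1) (delta.insert (i : Int) t)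
            (posAdd (posDiscard pos s (i : Int)) t (i : Int)) (swaps ++ [[s, t]])
    | _, _ => swaps  -- IndexError on map2; raises in Source B too; excluded by Pre_
  else swaps
termination_by n - i

def map_convert_alt (map1 : List Int) (map2 : List Int) (num_q_phy : Int) :
    List (List Int) :=
  loopB map1 map2 map1.length 0 PySem.Dict.empty (buildPos map1) []

-- ===== PRECONDITION & SPEC =====
-- Pre_ excludes exactly the inputs on which A raises: map2 shorter than map1
-- (IndexError) or a '-1' in exactly one of map1[i]/map2[i] (the bare 'raise()').
def Pre_map_convert (map1 : List Int) (map2 : List Int) (num_q_phy : Int) : Prop :=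
  map1.length ≤ map2.length ∧
  (∀ k < map1.length, (map1[k]? = some (-1) ↔ map2[k]? = some (-1)))

instance (map1 : List Int) (map2 : List Int) (num_q_phy : Int) :
    Decidable (Pre_map_convert map1 map2 num_q_phy) := by
  unfold Pre_map_convert; infer_instance

def pvWitness_map_convert : List Int × List Int × Int := ([0, 2, 1], [1, 0, 2], 3)

def Spec_map_convert (map1 : List Int) (map2 : List Int) (num_q_phy : Int)
    (out : List (List Int)) : Prop := out = map_convert_alt map1 map2 num_q_phy
instance (map1 : List Int) (map2 : List Int) (num_q_phy : Int) (out : List (List Int)) :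
    Decidable (Spec_map_convert map1 map2 num_q_phy out) := by
  unfold Spec_map_convert; infer_instance

-- ===== CLAIM (what is proved, stated in full; the proofs are below) =====
def Claim_equal_map_convert : Prop := ∀ (map1 : List Int) (map2 : List Int) (num_q_phy : Int), Dom_map_convert map1 map2 num_q_phy → Pre_map_convert map1 map2 num_q_phy → Spec_map_convert map1 map2 num_q_phy (map_convert map1 map2 num_q_phy)

-- ===== LEMMAS AND PROOFS =====

-- the sparse overlay computes the current array on top of the original map1
def HDelta (map1 cur : List Int) (delta : PySem.Dict Int Int) : Prop :=
  ∀ (k : Nat) (v w : Int), map1[k]? = some v → cur[k]? = some w →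
    delta.getD (k : Int) v = w

-- the inverted multimap is exact: pos[v] is the set of positions of cur holding v
def HPos (cur : List Int) (pos : PySem.Dict Int (PySem.Set Int)) : Prop :=
  ∀ v : Int, v ≠ -1 → ∀ x : Int,
    (x ∈ pos.getD v PySem.Set.empty ↔ ∃ k : Nat, x = (k : Int) ∧ cur[k]? = some v)

lemma getElem?_set_set (cur : List Int) (i k : Nat) (s t : Int)
    (hi : i < cur.length) (hk : k < cur.length) (hik : i ≠ k) (m : Nat) :
    ((cur.set k s).set i t)[m]? = if m = i then some t else if m = k then some s else cur[m]? := by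
  by_cases hmi : m = i
  · subst hmi
    rw [List.getElem?_set, if_pos rfl, List.length_set, if_pos hi, if_pos rfl]
  · rw [List.getElem?_set, if_neg (fun h => hmi h.symm), if_neg hmi, List.getElem?_set]
    by_cases hmk : m = k
    · rw [if_pos hmk.symm, if_pos hk, if_pos hmk]
    · rw [if_neg (fun h => hmk h.symm), if_neg hmk]

lemma getElem?_set_one (cur : List Int) (i : Nat) (t : Int)
    (hi : i < cur.length) (m : Nat) :
    (cur.set i t)[m]? = if m = i then some t else cur[m]? := by
  by_cases hmi : m = i
  · subst hmi
    rw [List.getElem?_set, if_pos rfl, if_pos hi, if_pos rfl]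
  · rw [List.getElem?_set, if_neg (fun h => hmi h.symm), if_neg hmi]

lemma innerA_not_mem (m : List Int) (t s : Int) (h : t ∉ m) : innerA m t s = m := by
  induction m with
  | nil => rfl
  | cons x xs ih =>
    simp only [List.mem_cons, not_or] at h
    simp [innerA, Ne.symm h.1, ih h.2]

lemma innerA_eq_set (m : List Int) (t s : Int) :
    ∀ k : Nat, m[k]? = some t → (∀ k' < k, m[k']? ≠ some t) →
    innerA m t s = m.set k s := by
  induction m with
  | nil => intro k hk _; simp at hk
  | cons x xs ih =>
    intro k hk hfirst
    cases k with
    | zero =>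
      simp only [List.getElem?_cons_zero, Option.some.injEq] at hk
      subst hk; simp [innerA]
    | succ k =>
      have hx : x ≠ t := by
        have := hfirst 0 (Nat.succ_pos k)
        simpa using this
      simp only [List.getElem?_cons_succ] at hk
      have hf' : ∀ k' < k, xs[k']? ≠ some t := by
        intro k' hlt
        have := hfirst (k' + 1) (by omega)
        simpa using this
      simp [innerA, hx, List.set, ih k hk hf']

-- ===== getD computations for the pos pipeline =====

lemma posAdd_getD (pos : PySem.Dict Int (PySem.Set Int)) (v x u : Int) :
    (posAdd pos v x).getD u PySem.Set.empty =
      if u = v then PySem.Set.add (pos.getD v PySem.Set.empty) x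
      else pos.getD u PySem.Set.empty := by
  rw [posAdd, PySem.Dict.getD_insert]

lemma posDiscard_getD (pos : PySem.Dict Int (PySem.Set Int)) (v x u : Int) :
    (posDiscard pos v x).getD u PySem.Set.empty =
      if u = v then PySem.Set.discard (pos.getD v PySem.Set.empty) x
      else pos.getD u PySem.Set.empty := by
  cases hg : pos.get? v with
  | none =>
    have hpd : posDiscard pos v x = pos := by simp only [posDiscard, hg]
    have hd : pos.getD v PySem.Set.empty = PySem.Set.empty := by
      rw [PySem.Dict.getD_eq_get?_getD, hg]; rfl
    rw [hpd]
    by_cases hu : u = v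
    · rw [if_pos hu, hu, hd]; rfl
    · rw [if_neg hu]
  | some ps =>
    have hd : pos.getD v PySem.Set.empty = ps := by
      rw [PySem.Dict.getD_eq_get?_getD, hg]; rfl
    by_cases hps : ps = []
    · have hpd : posDiscard pos v x = pos := by simp only [posDiscard, hg, if_pos hps]
      rw [hpd]
      by_cases hu : u = v
      · rw [if_pos hu, hu, hd, hps]; rfl
      · rw [if_neg hu]
    · have hpd : posDiscard pos v x = pos.insert v (PySem.Set.discard ps x) := by
        simp only [posDiscard, hg, if_neg hps]
      rw [hpd, PySem.Dict.getD_insert, hd]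

-- ===== building the inverted multimap =====

lemma buildPos_mem_aux (l : List Int) :
    ∀ (st : Int) (d : PySem.Dict Int (PySem.Set Int)) (v x : Int),
      (x ∈ ((PySem.List.enumerate l st).foldl
          (fun d p => if p.2 ≠ -1 then posAdd d p.2 p.1 else d) d).getD v PySem.Set.empty
        ↔ x ∈ d.getD v PySem.Set.empty ∨
          (v ≠ -1 ∧ ∃ k : Nat, x = st + (k : Int) ∧ l[k]? = some v)) := by
  induction l with
  | nil =>
    intro st d v x
    rw [PySem.List.enumerate_nil]
    simp
  | cons y ys ih =>
    intro st d v x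
    rw [PySem.List.enumerate_cons]
    simp only [List.foldl_cons]
    by_cases hy : y ≠ -1
    · rw [if_pos hy, ih (st + 1) (posAdd d y st) v x, posAdd_getD]
      by_cases hvy : v = y
      · subst hvy
        rw [if_pos rfl]
        constructor
        · rintro (h | ⟨hv, k, hk, hl⟩)
          · rcases (PySem.Set.mem_add _ _ _).mp h with h | rfl
            · exact Or.inl h
            · exact Or.inr ⟨hy, 0, by push_cast; omega, by simp⟩
          · exact Or.inr ⟨hv, k + 1, by push_cast at hk ⊢; omega, by simpa using hl⟩
        · rintro (h | ⟨hv, k, hk, hl⟩)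
          · exact Or.inl ((PySem.Set.mem_add _ _ _).mpr (Or.inl h))
          · cases k with
            | zero =>
              exact Or.inl ((PySem.Set.mem_add _ _ _).mpr (Or.inr (by push_cast at hk; omega)))
            | succ k =>
              simp only [List.getElem?_cons_succ] at hl
              exact Or.inr ⟨hv, k, by push_cast at hk ⊢; omega, hl⟩
      · rw [if_neg hvy]
        constructor
        · rintro (h | ⟨hv, k, hk, hl⟩)
          · exact Or.inl h
          · exact Or.inr ⟨hv, k + 1, by push_cast at hk ⊢; omega, by simpa using hl⟩
        · rintro (h | ⟨hv, k, hk, hl⟩)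
          · exact Or.inl h
          · cases k with
            | zero =>
              simp only [List.getElem?_cons_zero, Option.some.injEq] at hl
              exact absurd hl.symm hvy
            | succ k =>
              simp only [List.getElem?_cons_succ] at hl
              exact Or.inr ⟨hv, k, by push_cast at hk ⊢; omega, hl⟩
    · rw [if_neg hy]
      push_neg at hy
      rw [ih (st + 1) d v x]
      constructor
      · rintro (h | ⟨hv, k, hk, hl⟩)
        · exact Or.inl h
        · exact Or.inr ⟨hv, k + 1, by push_cast at hk ⊢; omega, by simpa using hl⟩
      · rintro (h | ⟨hv, k, hk, hl⟩)
        · exact Or.inl h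
        · cases k with
          | zero =>
            simp only [List.getElem?_cons_zero, Option.some.injEq] at hl
            exact absurd (hl ▸ hy) hv
          | succ k =>
            simp only [List.getElem?_cons_succ] at hl
            exact Or.inr ⟨hv, k, by push_cast at hk ⊢; omega, hl⟩

lemma hpos_build (map1 : List Int) : HPos map1 (buildPos map1) := by
  intro v hv x
  rw [buildPos, buildPos_mem_aux map1 0 PySem.Dict.empty v x]
  simp only [PySem.Dict.getD_empty]
  constructor
  · rintro (h | ⟨_, k, hk, hl⟩)
    · simp [PySem.Set.empty] at h
    · exact ⟨k, by omega, hl⟩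
  · rintro ⟨k, hk, hl⟩
    exact Or.inr ⟨hv, k, by omega, hl⟩

-- ===== the two loops agree =====

lemma loops_eq (map1 map2 : List Int) (n : Nat) (hn : n = map1.length) :
    ∀ (d i : Nat) (cur : List Int) (delta : PySem.Dict Int Int)
      (pos : PySem.Dict Int (PySem.Set Int)) (swaps : List (List Int)),
      n ≤ i + d → cur.length = n →
      HDelta map1 cur delta → HPos cur pos →
      loopA map2 n i cur swaps = loopB map1 map2 n i delta pos swaps := by
  intro d
  induction d with
  | zero =>
    intro i cur delta pos swaps hd hlen _ _
    have hin : ¬ i < n := by omega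
    rw [loopA, loopB]
    simp [hin]
  | succ d ih =>
    intro i cur delta pos swaps hd hlen hdelta hpos
    by_cases hin : i < n
    · have hi1 : i < map1.length := by omega
      have hic : i < cur.length := by omega
      have hcw : cur[i]? = some cur[i] := List.getElem?_eq_getElem hic
      have hm1 : map1[i]? = some map1[i] := List.getElem?_eq_getElem hi1
      have hgc : PySem.List.pyGet? cur (i : Int) = some cur[i] := by
        rw [PySem.List.pyGet?_natCast]; exact hcw
      have hg1 : PySem.List.pyGet? map1 (i : Int) = some map1[i] := by
        rw [PySem.List.pyGet?_natCast]; exact hm1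
      have hs : delta.getD (i : Int) map1[i] = cur[i] := hdelta i map1[i] cur[i] hm1 hcw
      rw [loopA, loopB]
      simp only [dif_pos hin]
      rw [hgc, hg1]
      cases hg2 : PySem.List.pyGet? map2 (i : Int) with
      | none => rfl
      | some t =>
        simp only [hs]
        by_cases hneg : cur[i] = -1 ∨ t = -1
        · rw [if_pos hneg, if_pos hneg]
          by_cases hb : cur[i] = -1 ∧ t = -1
          · rw [if_pos hb, if_pos hb]
            exact ih (i + 1) cur delta pos swaps (by omega) hlen hdelta hpos
          · rw [if_neg hb, if_neg hb]
        · rw [if_neg hneg, if_neg hneg]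
          have hwne : cur[i] ≠ -1 := fun h => hneg (Or.inl h)
          have htne : t ≠ -1 := fun h => hneg (Or.inr h)
          by_cases hwt : cur[i] = t
          · rw [if_neg (by simpa using hwt), if_pos hwt]
            exact ih (i + 1) cur delta pos swaps (by omega) hlen hdelta hpos
          · rw [if_pos (by simpa using hwt), if_neg hwt]
            cases hmin : PySem.List.min? (pos.getD t PySem.Set.empty) (fun x => x) with
            | none =>
              -- the set of positions holding t is empty: t occurs nowhere in cur
              have hts : pos.getD t PySem.Set.empty = [] :=
                (PySem.List.min?_eq_none_iff _ (fun x => x)).mp hmin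
              have hnm : ∀ m : Nat, cur[m]? ≠ some t := by
                intro m hm
                have := (hpos t htne (m : Int)).mpr ⟨m, rfl, hm⟩
                rw [hts] at this
                simp at this
              have hnotmem : t ∉ cur := by
                intro hm
                obtain ⟨j, hjl, hj⟩ := List.mem_iff_getElem.mp hm
                exact hnm j (by rw [List.getElem?_eq_getElem hjl, hj])
              rw [innerA_not_mem cur t cur[i] hnotmem, PySem.List.pySetD_natCast]
              refine ih (i + 1) (cur.set i t) (delta.insert (i : Int) t)
                (posAdd (posDiscard pos cur[i] (i : Int)) t (i : Int))
                (swaps ++ [[cur[i], t]]) (by omega) (by simp [hlen]) ?_ ?_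
              · -- HDelta
                intro k' v0 w0 hv0 hw0
                rw [getElem?_set_one cur i t hic k'] at hw0
                by_cases hk'i : k' = i
                · rw [if_pos hk'i] at hw0
                  cases hw0
                  rw [hk'i, PySem.Dict.getD_insert, if_pos rfl]
                · rw [if_neg hk'i] at hw0
                  rw [PySem.Dict.getD_insert, if_neg (by omega)]
                  exact hdelta k' v0 w0 hv0 hw0
              · -- HPos
                intro v' hv' x
                have hRHS : ∀ k' : Nat, (cur.set i t)[k']? = some v' ↔
                    (k' = i ∧ v' = t) ∨ (k' ≠ i ∧ cur[k']? = some v') := by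
                  intro k'
                  rw [getElem?_set_one cur i t hic k']
                  by_cases hk'i : k' = i
                  · simp [hk'i, eq_comm]
                  · simp [hk'i]
                rw [posAdd_getD]
                by_cases hv't : v' = t
                · subst hv't
                  rw [if_pos rfl, posDiscard_getD, if_neg (fun h => hwt h.symm),
                    PySem.Set.mem_add]
                  constructor
                  · rintro (hx | rfl)
                    · obtain ⟨k', _, hc⟩ := (hpos _ hv' x).mp hx
                      exact absurd hc (hnm k')
                    · exact ⟨i, rfl, (hRHS i).mpr (Or.inl ⟨rfl, rfl⟩)⟩
                  · rintro ⟨k', rfl, hc⟩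
                    rcases (hRHS k').mp hc with ⟨rfl, _⟩ | ⟨hk'i, hc'⟩
                    · exact Or.inr rfl
                    · exact absurd hc' (hnm k')
                · rw [if_neg hv't, posDiscard_getD]
                  by_cases hv's : v' = cur[i]
                  · subst hv's
                    rw [if_pos rfl, PySem.Set.mem_discard]
                    constructor
                    · rintro ⟨hx, hxi⟩
                      obtain ⟨k', rfl, hc⟩ := (hpos _ hv' x).mp hx
                      refine ⟨k', rfl, (hRHS k').mpr (Or.inr ⟨?_, hc⟩)⟩
                      rintro rfl
                      exact hxi rfl
                    · rintro ⟨k', rfl, hc⟩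
                      rcases (hRHS k').mp hc with ⟨rfl, hv''⟩ | ⟨hk'i, hc'⟩
                      · exact absurd hv'' hv't
                      · refine ⟨(hpos _ hv' (k' : Int)).mpr ⟨k', rfl, hc'⟩, ?_⟩
                        intro h
                        exact hk'i (by exact_mod_cast h)
                  · rw [if_neg hv's, hpos v' hv' x]
                    constructor
                    · rintro ⟨k', rfl, hc⟩
                      refine ⟨k', rfl, (hRHS k').mpr (Or.inr ⟨?_, hc⟩)⟩
                      rintro rfl
                      exact hv's (by rw [hcw] at hc; exact (Option.some.inj hc).symm)
                    · rintro ⟨k', rfl, hc⟩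
                      rcases (hRHS k').mp hc with ⟨_, hv''⟩ | ⟨_, hc'⟩
                      · exact absurd hv'' hv't
                      · exact ⟨k', rfl, hc'⟩
            | some q =>
              -- q = min of the positions of cur holding t: its first occurrence
              have hqmem : q ∈ pos.getD t PySem.Set.empty := PySem.List.min?_mem hmin
              obtain ⟨k, rfl, hkt⟩ := (hpos t htne q).mp hqmem
              have hkl : k < cur.length := (List.getElem?_eq_some_iff.mp hkt).1
              have hik : i ≠ k := by
                rintro rfl
                rw [hcw] at hkt
                exact hwt (Option.some.inj hkt)
              have hst : cur[i] ≠ t := hwt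
              have hfirst : ∀ k' < k, cur[k']? ≠ some t := by
                intro k' hlt hc
                have hx : ((k' : Nat) : Int) ∈ pos.getD t PySem.Set.empty :=
                  (hpos t htne (k' : Int)).mpr ⟨k', rfl, hc⟩
                have := PySem.List.min?_isMin hmin _ hx
                simp only at this
                omega
              have hinner : innerA cur t cur[i] = cur.set k cur[i] :=
                innerA_eq_set cur t cur[i] k hkt hfirst
              rw [hinner, PySem.List.pySetD_natCast]
              refine ih (i + 1) ((cur.set k cur[i]).set i t)
                ((delta.insert (k : Int) cur[i]).insert (i : Int) t)
                (posAdd (posDiscard (posAdd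
                  (pos.insert t (PySem.Set.discard (pos.getD t PySem.Set.empty) (k : Int)))
                  cur[i] (k : Int)) cur[i] (i : Int)) t (i : Int))
                (swaps ++ [[cur[i], t]]) (by omega) (by simp [hlen]) ?_ ?_
              · -- HDelta
                intro k' v0 w0 hv0 hw0
                rw [getElem?_set_set cur i k cur[i] t hic hkl hik k'] at hw0
                by_cases hk'i : k' = i
                · rw [if_pos hk'i] at hw0
                  cases hw0
                  rw [hk'i, PySem.Dict.getD_insert, if_pos rfl]
                · rw [if_neg hk'i] at hw0
                  by_cases hk'k : k' = k
                  · rw [if_pos hk'k] at hw0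
                    cases hw0
                    rw [hk'k, PySem.Dict.getD_insert, if_neg (by omega),
                      PySem.Dict.getD_insert, if_pos rfl]
                  · rw [if_neg hk'k] at hw0
                    rw [PySem.Dict.getD_insert, if_neg (by omega),
                      PySem.Dict.getD_insert, if_neg (by omega)]
                    exact hdelta k' v0 w0 hv0 hw0
              · -- HPos
                intro v' hv' x
                have hRHS : ∀ k' : Nat, ((cur.set k cur[i]).set i t)[k']? = some v' ↔
                    (k' = i ∧ v' = t) ∨ (k' = k ∧ v' = cur[i]) ∨
                      (k' ≠ i ∧ k' ≠ k ∧ cur[k']? = some v') := by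
                  intro k'
                  rw [getElem?_set_set cur i k cur[i] t hic hkl hik k']
                  by_cases h1 : k' = i
                  · rw [if_pos h1]
                    constructor
                    · intro h
                      exact Or.inl ⟨h1, (Option.some.inj h).symm⟩
                    · rintro (⟨_, rfl⟩ | ⟨h2, _⟩ | ⟨h2, _, _⟩)
                      · rfl
                      · exact absurd (h1.symm.trans h2) hik
                      · exact absurd h1 h2
                  · rw [if_neg h1]
                    by_cases h2 : k' = k
                    · rw [if_pos h2]
                      constructor
                      · intro h
                        exact Or.inr (Or.inl ⟨h2, (Option.some.inj h).symm⟩)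
                      · rintro (⟨h3, _⟩ | ⟨_, rfl⟩ | ⟨_, h3, _⟩)
                        · exact absurd h3 h1
                        · rfl
                        · exact absurd h2 h3
                    · rw [if_neg h2]
                      constructor
                      · intro h
                        exact Or.inr (Or.inr ⟨h1, h2, h⟩)
                      · rintro (⟨h3, _⟩ | ⟨h3, _⟩ | ⟨_, _, h3⟩)
                        · exact absurd h3 h1
                        · exact absurd h3 h2
                        · exact h3
                rw [posAdd_getD]
                by_cases hv't : v' = t
                · subst hv't
                  rw [if_pos rfl, posDiscard_getD, if_neg (fun h => hst h.symm),
                    posAdd_getD, if_neg (fun h => hst h.symm), PySem.Dict.getD_insert,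
                    if_pos rfl, PySem.Set.mem_add]
                  constructor
                  · rintro (hx | rfl)
                    · rw [PySem.Set.mem_discard] at hx
                      obtain ⟨hx1, hx2⟩ := hx
                      obtain ⟨k', rfl, hc⟩ := (hpos _ hv' x).mp hx1
                      refine ⟨k', rfl, (hRHS k').mpr (Or.inr (Or.inr ⟨?_, ?_, hc⟩))⟩
                      · rintro rfl
                        rw [hcw] at hc
                        exact hwt (Option.some.inj hc)
                      · rintro rfl
                        exact hx2 rfl
                    · exact ⟨i, rfl, (hRHS i).mpr (Or.inl ⟨rfl, rfl⟩)⟩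
                  · rintro ⟨k', rfl, hc⟩
                    rcases (hRHS k').mp hc with ⟨rfl, _⟩ | ⟨rfl, hv''⟩ | ⟨h1, h2, hc'⟩
                    · exact Or.inr rfl
                    · exact absurd hv''.symm hst
                    · refine Or.inl ?_
                      rw [PySem.Set.mem_discard]
                      refine ⟨(hpos _ hv' (k' : Int)).mpr ⟨k', rfl, hc'⟩, ?_⟩
                      intro h
                      exact h2 (by exact_mod_cast h)
                · rw [if_neg hv't, posDiscard_getD]
                  by_cases hv's : v' = cur[i]
                  · subst hv's
                    rw [if_pos rfl, posAdd_getD, if_pos rfl, PySem.Dict.getD_insert,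
                      if_neg hst, PySem.Set.mem_discard, PySem.Set.mem_add]
                    constructor
                    · rintro ⟨hx | rfl, hxi⟩
                      · obtain ⟨k', rfl, hc⟩ := (hpos _ hv' x).mp hx
                        refine ⟨k', rfl, (hRHS k').mpr (Or.inr (Or.inr ⟨?_, ?_, hc⟩))⟩
                        · rintro rfl
                          exact hxi rfl
                        · rintro rfl
                          rw [hkt] at hc
                          exact hst (Option.some.inj hc).symm
                      · exact ⟨k, rfl, (hRHS k).mpr (Or.inr (Or.inl ⟨rfl, rfl⟩))⟩
                    · rintro ⟨k', rfl, hc⟩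
                      rcases (hRHS k').mp hc with ⟨rfl, hv''⟩ | ⟨rfl, _⟩ | ⟨h1, h2, hc'⟩
                      · exact absurd hv'' hv't
                      · refine ⟨Or.inr rfl, ?_⟩
                        intro h
                        exact hik (by omega)
                      · refine ⟨Or.inl ((hpos _ hv' (k' : Int)).mpr ⟨k', rfl, hc'⟩), ?_⟩
                        intro h
                        exact h1 (by exact_mod_cast h)
                  · rw [if_neg hv's, posAdd_getD, if_neg hv's, PySem.Dict.getD_insert,
                      if_neg hv't, hpos v' hv' x]
                    constructor
                    · rintro ⟨k', rfl, hc⟩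
                      refine ⟨k', rfl, (hRHS k').mpr (Or.inr (Or.inr ⟨?_, ?_, hc⟩))⟩
                      · rintro rfl
                        exact hv's (by rw [hcw] at hc; exact (Option.some.inj hc).symm)
                      · rintro rfl
                        exact hv't (by rw [hkt] at hc; exact (Option.some.inj hc).symm)
                    · rintro ⟨k', rfl, hc⟩
                      rcases (hRHS k').mp hc with ⟨_, hv''⟩ | ⟨_, hv''⟩ | ⟨_, _, hc'⟩
                      · exact absurd hv'' hv't
                      · exact absurd hv'' hv's
                      · exact ⟨k', rfl, hc'⟩
    · rw [loopA, loopB]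
      simp [hin]

-- ===== VERDICT =====
theorem map_convert_spec : Claim_equal_map_convert := by
  intro map1 map2 num_q_phy _hdom _hpre
  unfold Spec_map_convert map_convert map_convert_alt
  exact loops_eq map1 map2 map1.length rfl map1.length 0 map1 PySem.Dict.empty
    (buildPos map1) [] (by omega) rfl
    (fun k v w hv hw => by
      rw [PySem.Dict.getD_empty]
      rw [hv] at hw
      exact Option.some.inj hw)
    (hpos_build map1)
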